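-- pv_equiv track=rewrite | github.com/roymany/ProCalculator | main.py | check_tilda_and_neg
-- ===== SOURCE A (Python) =====
-- RIGHT_TO_LEFT_OPERATORS = ['!', '#']
--
-- def check_tilda_and_neg(string: str) -> []:
--     """
--     :param string: get math expression as string
--     :return: list that every element is char in the string and all '-' in a row become 1 (if the number of them is odd)
--      and all '-' which suppose to be negative and not operator becomes '~', also the function check all '-' and '~' are
--     :raise ValueError for illegal syntax problems with '-- and '~' in the expression for example: (~~2)
--     """
--     if string[-1] == '~' or string[-1] == '-':
--         raise ValueError("'-' or '~' cannot be in the end of a mathematical expression")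
--     if 't' in string or '_' in string:
--         raise ValueError("illegal char in expression")
--     expression_with_correct_minuses = []
--     index = -1
--     while index < len(string):
--         index += 1
--         t_counter = 0
--         if index < len(string):
--             if string[index] == '~' and index > 0 and (
--                     string[index - 1].isnumeric() or string[index - 1] == ')'
--                     or string[index - 1] in RIGHT_TO_LEFT_OPERATORS):
--                 raise ValueError("'~' cannot be use as binary operator like '-'")
--             if string[index] == '-' and index > 0 and (
--                     string[index - 1].isnumeric() or string[index - 1] == ')' or
--                     string[index - 1] in RIGHT_TO_LEFT_OPERATORS):
--                 expression_with_correct_minuses.append('-')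
--             elif string[index] == '-' and (index == 0 or string[index - 1] == '('):
--                 t_counter += 1
--                 index += 1
--                 while index < len(string) and string[index] == '-':
--                     t_counter += 1
--                     index += 1
--                 if t_counter % 2 == 1:
--                     expression_with_correct_minuses.append('_')
--                 else:
--                     expression_with_correct_minuses.append('t')
--                 index -= 1
--             elif string[index] == '~' or string[index] == '-':
--                 t_counter += 1
--                 if (not expression_with_correct_minuses) or (expression_with_correct_minuses[
--                                                                  len(expression_with_correct_minuses) - 1] != '~' and
--                                                              expression_with_correct_minuses[
--                                                                  len(expression_with_correct_minuses) - 1] != 't' and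
--                                                              expression_with_correct_minuses[
--                                                                  len(expression_with_correct_minuses) - 1] != '_'):
--                     index += 1
--                     while index < len(string) and string[index] == '-':
--                         t_counter += 1
--                         index += 1
--                     if t_counter % 2 == 1:
--                         expression_with_correct_minuses.append('~')
--                     else:
--                         expression_with_correct_minuses.append('t')
--                     index -= 1
--                 else:
--                     raise ValueError(
--                         "2 '~' in a row cannot be in a mathematical expression unless the first '-' is an operator")
--             else:
--                 expression_with_correct_minuses.append(string[index])
--     for item in expression_with_correct_minuses:
--         if item == 't':
--             expression_with_correct_minuses.remove(item)
--     return expression_with_correct_minuses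
-- ===== SOURCE B (Python) =====
-- def check_tilda_and_neg(string: str) -> []:
--     """Two-stage pipeline: a closed-form validation pass over the '~' positions,
--     then an emission pass that groups maximal unary-sign runs, emitting one
--     marker per odd-length run; no remove-cleanup, no back-stepping index."""
--     if string == "" or string[-1] == '-' or string[-1] == '~':
--         raise ValueError("'-' or '~' cannot be in the end of a mathematical expression")
--     if 't' in string or '_' in string:
--         raise ValueError("illegal char in expression")
--     operand_end = set('0123456789)!#')  # chars after which a sign is a binary operator
--     # stage 1: every '~' must not follow an operand end, a '~', or a unary '-'
--     for i, c in enumerate(string):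
--         if c == '~' and i > 0:
--             p = string[i - 1]
--             if p in operand_end:
--                 raise ValueError("'~' cannot be use as binary operator like '-'")
--             if p == '~' or (p == '-' and not (i >= 2 and string[i - 2] in operand_end)):
--                 raise ValueError(
--                     "2 '~' in a row cannot be in a mathematical expression unless the first '-' is an operator")
--     # stage 2: emit; a maximal run of unary signs collapses to one marker iff its length is odd
--     out = []
--     run = None  # pending (marker, length) for the current unary-sign run
--     for i, c in enumerate(string):
--         if c == '~' or (c == '-' and not (i > 0 and string[i - 1] in operand_end)):
--             if run is None:
--                 run = ('_' if c == '-' and (i == 0 or string[i - 1] == '(') else '~', 1)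
--             else:
--                 run = (run[0], run[1] + 1)
--         else:
--             if run is not None:
--                 if run[1] % 2 == 1:
--                     out.append(run[0])
--                 run = None
--             out.append(c)
--     # string never ends with a sign (checked above), so no run is pending here
--     return out
-- ===== Notes on version B (the rewrite author's own statement) =====
-- stated objective: faster
-- what changed: B is a two-stage pipeline: a closed-form validation pass over the '~' positions (no emission state), then an emission pass that groups maximal unary-sign runs and emits one marker per odd-length run when the run closes, replacing A's interleaved validate/emit loop with index back-stepping, inner '-' scans and its quadratic remove-during-iteration cleanup pass.
import Mathlib
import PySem

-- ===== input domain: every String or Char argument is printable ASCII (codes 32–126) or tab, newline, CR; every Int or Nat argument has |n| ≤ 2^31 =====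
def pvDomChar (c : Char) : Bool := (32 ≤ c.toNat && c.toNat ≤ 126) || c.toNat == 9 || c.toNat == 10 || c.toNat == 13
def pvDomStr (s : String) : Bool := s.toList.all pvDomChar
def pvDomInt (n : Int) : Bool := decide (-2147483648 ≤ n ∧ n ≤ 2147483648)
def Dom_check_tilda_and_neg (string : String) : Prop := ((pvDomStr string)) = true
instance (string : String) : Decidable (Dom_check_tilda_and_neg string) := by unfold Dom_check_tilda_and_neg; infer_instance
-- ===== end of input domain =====

-- B replaces A's interleaved validate/emit loop (with index back-stepping, inner '-' scans and a
-- quadratic remove-during-iteration cleanup) by two stages: a closed-form validation pass over the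
-- '~' positions, then one emission pass grouping maximal unary-sign runs (objective: faster).
-- Python exceptions (ValueError / IndexError on "") are outside Pre_; both ports return [] there.
-- The loops carry a Nat fuel (always sufficient at the call sites) so that they are structural.

-- ===== PORT A =====

-- inner `while index < len(string) and string[index] == '-': t_counter += 1; index += 1`;
-- returns the final (t_counter, index)
def pvRunA (s : List Char) (fuel j cnt : Nat) : Nat × Nat :=
  match fuel with
  | 0 => (cnt, j)
  | fuel + 1 =>
    if j < s.length ∧ s.getD j ' ' = '-' then pvRunA s fuel (j + 1) (cnt + 1) else (cnt, j)

-- the outer while loop of A; p is Python's `index` right after the `index += 1` at the top,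
-- so each call processes position p; `none` = a `raise ValueError` was reached.
-- s.getD (p-1) ' ' ports string[index-1]: it is only reached under a `0 < p` guard, as in Python.
def pvALoop (s : List Char) (fuel : Nat) (p : Nat) (acc : List String) : Option (List String) :=
  match fuel with
  | 0 => some acc          -- never reached: fuel > s.length - p at every call
  | fuel + 1 =>
    if p < s.length then
      if s.getD p ' ' = '~' ∧ 0 < p ∧ (PySem.Chars.isdigit (s.getD (p - 1) ' ') = true ∨
          s.getD (p - 1) ' ' = ')' ∨ s.getD (p - 1) ' ' ∈ ['!', '#']) then
        none  -- raise ValueError "'~' cannot be use as binary operator like '-'"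
      else if s.getD p ' ' = '-' ∧ 0 < p ∧ (PySem.Chars.isdigit (s.getD (p - 1) ' ') = true ∨
          s.getD (p - 1) ' ' = ')' ∨ s.getD (p - 1) ' ' ∈ ['!', '#']) then
        pvALoop s fuel (p + 1) (acc ++ ["-"])
      else if s.getD p ' ' = '-' ∧ (p = 0 ∨ s.getD (p - 1) ' ' = '(') then
        pvALoop s fuel (pvRunA s s.length (p + 1) 1).2
          (acc ++ [if (pvRunA s s.length (p + 1) 1).1 % 2 = 1 then "_" else "t"])
      else if s.getD p ' ' = '~' ∨ s.getD p ' ' = '-' then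
        if acc.isEmpty = true ∨ (acc.getLastD "" ≠ "~" ∧ acc.getLastD "" ≠ "t" ∧ acc.getLastD "" ≠ "_") then
          pvALoop s fuel (pvRunA s s.length (p + 1) 1).2
            (acc ++ [if (pvRunA s s.length (p + 1) 1).1 % 2 = 1 then "~" else "t"])
        else none  -- raise ValueError "2 '~' in a row …"
      else pvALoop s fuel (p + 1) (acc ++ [String.ofList [s.getD p ' ']])
    else some acc

-- `for item in expression: if item == 't': expression.remove(item)` — CPython's
-- remove-during-iteration semantics: a cursor i over the mutating list
def pvRemLoop (l : List String) (fuel : Nat) (i : Nat) : List String :=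
  match fuel with
  | 0 => l                 -- never reached: fuel > number of loop iterations at every call
  | fuel + 1 =>
    if i < l.length then
      if l.getD i "" = "t" then pvRemLoop ((PySem.List.remove? l "t").getD l) fuel (i + 1)
      else pvRemLoop l fuel (i + 1)
    else l

def check_tilda_and_neg (string : String) : List String :=
  match string.toList.getLast? with
  | none => []        -- string[-1] raises IndexError on "" (outside Pre_)
  | some lc =>
    if lc = '~' ∨ lc = '-' then []    -- raise ValueError (outside Pre_)
    else if PySem.Chars.isIn ['t'] string.toList = true ∨ PySem.Chars.isIn ['_'] string.toList = true then
      []  -- raise ValueError (outside Pre_)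
    else
      match pvALoop string.toList (string.toList.length + 1) 0 [] with
      | none => []    -- raise ValueError inside the loop (outside Pre_)
      | some acc => pvRemLoop acc (acc.length + 1) 0

-- ===== PORT B =====

-- `c in operand_end` for operand_end = set('0123456789)!#')
def pvOperandEnd (c : Char) : Bool :=
  PySem.Chars.isdigit c || c == ')' || c == '!' || c == '#'

-- stage 1 of Source B: the validation for-loop; `true` = no raise
def pvValid (s : List Char) : Bool :=
  (List.range s.length).all fun i =>
    !(s.getD i ' ' == '~' && decide (0 < i)) ||
      (!(pvOperandEnd (s.getD (i - 1) ' ')) &&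
       !(s.getD (i - 1) ' ' == '~' ||
         (s.getD (i - 1) ' ' == '-' && !(decide (2 ≤ i) && pvOperandEnd (s.getD (i - 2) ' ')))))

-- stage 2 of Source B: the emission for-loop; run = pending (marker, length) of the current unary run
def pvCLoop (s : List Char) (fuel i : Nat) (out : List String) (run : Option (String × Nat)) :
    List String :=
  match fuel with
  | 0 => out               -- never reached: fuel > s.length - i at every call
  | fuel + 1 =>
    if i < s.length then
      if s.getD i ' ' = '~' ∨
          (s.getD i ' ' = '-' ∧ ¬ (0 < i ∧ pvOperandEnd (s.getD (i - 1) ' ') = true)) then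
        match run with
        | none =>
          pvCLoop s fuel (i + 1) out
            (some ((if s.getD i ' ' = '-' ∧ (i = 0 ∨ s.getD (i - 1) ' ' = '(') then "_" else "~"), 1))
        | some (m, k) => pvCLoop s fuel (i + 1) out (some (m, k + 1))
      else
        pvCLoop s fuel (i + 1)
          ((match run with
            | none => out
            | some (m, k) => if k % 2 = 1 then out ++ [m] else out) ++ [String.ofList [s.getD i ' ']])
          none
    else out

def check_tilda_and_neg_alt (string : String) : List String :=
  if string.toList = [] ∨ string.toList.getLastD ' ' = '-' ∨ string.toList.getLastD ' ' = '~' then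
    []  -- raise ValueError (outside Pre_)
  else if PySem.Chars.isIn ['t'] string.toList = true ∨ PySem.Chars.isIn ['_'] string.toList = true then
    []  -- raise ValueError (outside Pre_)
  else if pvValid string.toList = false then
    []  -- a raise in the validation pass (outside Pre_)
  else pvCLoop string.toList (string.toList.length + 1) 0 [] none

-- ===== PRECONDITION & SPEC =====

-- Bool form of the per-'~' syntax condition, so Pre_ is decidable by a bounded scan
def pvTildeOk (l : List Char) (i : Nat) : Bool :=
  !(l.getD i ' ' == '~') || decide (i = 0) ||
    (!(PySem.Chars.isdigit (l.getD (i - 1) ' ') || l.getD (i - 1) ' ' == ')' ||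
        l.getD (i - 1) ' ' == '!' || l.getD (i - 1) ' ' == '#') &&
     !(l.getD (i - 1) ' ' == '~') &&
     (!(l.getD (i - 1) ' ' == '-') ||
       (decide (2 ≤ i) &&
        (PySem.Chars.isdigit (l.getD (i - 2) ' ') || l.getD (i - 2) ' ' == ')' ||
         l.getD (i - 2) ' ' == '!' || l.getD (i - 2) ' ' == '#'))))

-- Pre_ = exactly the inputs on which Python A returns normally: nonempty, not ending in '-'/'~',
-- no 't'/'_' anywhere, and every '~' either starts the string, or follows a char that is not a
-- digit/')'/'!'/'#'/'~' and, if that char is '-', that '-' is a binary minus (its own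
-- predecessor is a digit/')'/'!'/'#').  On all other inputs A raises (ValueError / IndexError).
def Pre_check_tilda_and_neg (string : String) : Prop :=
  string.toList ≠ [] ∧
  string.toList.getLastD ' ' ≠ '~' ∧ string.toList.getLastD ' ' ≠ '-' ∧
  't' ∉ string.toList ∧ '_' ∉ string.toList ∧
  ∀ i : Nat, i < string.toList.length → pvTildeOk string.toList i = true

instance (string : String) : Decidable (Pre_check_tilda_and_neg string) := by
  unfold Pre_check_tilda_and_neg; infer_instance

def pvWitness_check_tilda_and_neg : String := "(-4)--2*~3"

def Spec_check_tilda_and_neg (string : String) (out : List String) : Prop := out = check_tilda_and_neg_alt string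
instance (string : String) (out : List String) : Decidable (Spec_check_tilda_and_neg string out) := by unfold Spec_check_tilda_and_neg; infer_instance

-- ===== CLAIM (what is proved, stated in full; the proofs are below) =====
def Claim_equal_check_tilda_and_neg : Prop := ∀ (string : String), Dom_check_tilda_and_neg string → Pre_check_tilda_and_neg string → Spec_check_tilda_and_neg string (check_tilda_and_neg string)

-- ===== LEMMAS AND PROOFS =====

-- the no-two-adjacent-"t" relation kept as an invariant of A's accumulator
def pvR (a b : String) : Prop := a = "t" → b ≠ "t"

theorem pvGetD_append_length {α : Type} [Inhabited α] (as : List α) (b : α) (bs : List α) (d : α) :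
    (as ++ b :: bs).getD as.length d = b := by
  induction as with
  | nil => rfl
  | cons a as _ih => simp

theorem pvRemLoop_stop (l : List String) (fuel i : Nat) (h : ¬ i < l.length) :
    pvRemLoop l fuel i = l := by
  cases fuel with
  | zero => rfl
  | succ fuel => simp only [pvRemLoop, if_neg h]

-- A's final remove-loop, started at cursor = done.length on done ++ rest where done is clean,
-- equals plain filtering when rest never has two "t" in a row
theorem pvRem_gen (fuel : Nat) (rest done : List String) (hf : rest.length < fuel)
    (hd : ∀ x ∈ done, x ≠ "t") (hch : List.IsChain pvR rest) :
    pvRemLoop (done ++ rest) fuel done.length = done ++ rest.filter (· ≠ "t") := by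
  induction fuel generalizing rest done with
  | zero => omega
  | succ fuel ih =>
    match rest with
    | [] =>
      simp only [pvRemLoop]
      simp
    | x :: rs =>
      simp only [pvRemLoop]
      have hlen : done.length < (done ++ x :: rs).length := by simp
      rw [if_pos hlen, pvGetD_append_length]
      by_cases hx : x = "t"
      · rw [if_pos hx]
        subst hx
        have hmem : "t" ∈ done ++ "t" :: rs := by simp
        rw [PySem.List.remove?_eq_some_erase _ _ hmem]
        have herase : (done ++ "t" :: rs).erase "t" = done ++ rs := by
          rw [List.erase_append_right _ (by intro hc; exact hd _ hc rfl)]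
          simp
        simp only [Option.getD_some, herase]
        match rs with
        | [] =>
          rw [pvRemLoop_stop _ _ _ (by simp)]
          simp
        | y :: rs' =>
          have hy : y ≠ "t" := (List.isChain_cons_cons.mp hch).1 rfl
          have heq : done ++ y :: rs' = (done ++ [y]) ++ rs' := by simp
          rw [heq]
          have hlen2 : done.length + 1 = (done ++ [y]).length := by simp
          rw [hlen2]
          rw [ih rs' (done ++ [y]) (by simp at hf ⊢; omega)
            (by intro z hz; rcases List.mem_append.mp hz with h1 | h1
                · exact hd z h1
                · simpa using (by simpa using h1) ▸ hy)
            ((List.isChain_cons_cons.mp hch).2.tail)]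
          simp [hy]
      · rw [if_neg hx]
        have heq : done ++ x :: rs = (done ++ [x]) ++ rs := by simp
        rw [heq]
        have hlen2 : done.length + 1 = (done ++ [x]).length := by simp
        rw [hlen2]
        rw [ih rs (done ++ [x]) (by simp at hf ⊢; omega)
          (by intro z hz; rcases List.mem_append.mp hz with h1 | h1
              · exact hd z h1
              · simpa using (by simpa using h1) ▸ hx)
          hch.tail]
        simp [hx]

theorem pvRemLoop_eq_filter (acc : List String) (hch : List.IsChain pvR acc) :
    pvRemLoop acc (acc.length + 1) 0 = acc.filter (· ≠ "t") := by
  simpa using pvRem_gen (acc.length + 1) acc [] (by omega) (by simp) hch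

-- `j = i + 1; while j < n and string[j] == '-': j += 1` (proof-only: A's inner scan, recast)
def pvScanB (s : List Char) (fuel j : Nat) : Nat :=
  match fuel with
  | 0 => j
  | fuel + 1 =>
    if j < s.length ∧ s.getD j ' ' = '-' then pvScanB s fuel (j + 1) else j

-- proof-only bridge loop: A's control flow in jump form (marker flag, run jumps, no cleanup)
def pvJLoop (s : List Char) (fuel : Nat) (i : Nat) (out : List String) (lastMarker : Bool) :
    Option (List String) :=
  match fuel with
  | 0 => some out
  | fuel + 1 =>
    if i < s.length then
      if s.getD i ' ' = '~' ∨ s.getD i ' ' = '-' then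
        if pvOperandEnd (if i = 0 then ' ' else s.getD (i - 1) ' ') = true then
          if s.getD i ' ' = '~' then none
          else pvJLoop s fuel (i + 1) (out ++ ["-"]) false
        else if lastMarker = true then none
        else
          pvJLoop s fuel (pvScanB s s.length (i + 1))
            (if (pvScanB s s.length (i + 1) - i) % 2 = 1 then
               out ++ [if s.getD i ' ' = '-' ∧ (i = 0 ∨ (if i = 0 then ' ' else s.getD (i - 1) ' ') = '(')
                       then "_" else "~"]
             else out) true
      else pvJLoop s fuel (i + 1) (out ++ [String.ofList [s.getD i ' ']]) false
    else some out

theorem pvOperandEnd_iff (p : Char) :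
    pvOperandEnd p = true ↔ (PySem.Chars.isdigit p = true ∨ p = ')' ∨ p ∈ ['!', '#']) := by
  simp [pvOperandEnd]
  tauto

theorem pvScanB_ge (s : List Char) (fuel j : Nat) : j ≤ pvScanB s fuel j := by
  induction fuel generalizing j with
  | zero => exact le_refl j
  | succ fuel ih =>
    simp only [pvScanB]
    split
    · exact le_trans (by omega) (ih (j + 1))
    · exact le_refl j

theorem pvRunA_eq (s : List Char) (fuel j cnt : Nat) :
    pvRunA s fuel j cnt = (cnt + (pvScanB s fuel j - j), pvScanB s fuel j) := by
  induction fuel generalizing j cnt with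
  | zero => simp [pvRunA, pvScanB]
  | succ fuel ih =>
    simp only [pvRunA, pvScanB]
    by_cases hc : j < s.length ∧ s.getD j ' ' = '-'
    · rw [if_pos hc, if_pos hc, ih]
      have h2 := pvScanB_ge s fuel (j + 1)
      have : cnt + 1 + (pvScanB s fuel (j + 1) - (j + 1)) = cnt + (pvScanB s fuel (j + 1) - j) := by
        omega
      rw [this]
    · rw [if_neg hc, if_neg hc]
      simp

theorem pvScanB_prev (s : List Char) (fuel j : Nat) (h : pvScanB s fuel j ≠ j) :
    s.getD (pvScanB s fuel j - 1) ' ' = '-' := by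
  induction fuel generalizing j with
  | zero => exact absurd rfl h
  | succ fuel ih =>
    simp only [pvScanB] at h ⊢
    by_cases hc : j < s.length ∧ s.getD j ' ' = '-'
    · rw [if_pos hc] at h ⊢
      by_cases h2 : pvScanB s fuel (j + 1) = j + 1
      · rw [h2]
        simpa using hc.2
      · exact ih (j + 1) h2
    · rw [if_neg hc] at h
      exact absurd rfl h

theorem pv_getD_mem (s : List Char) (i : Nat) (h : i < s.length) (d : Char) :
    s.getD i d ∈ s := by
  rw [List.getD_eq_getElem s d h]
  exact List.getElem_mem h

-- main lockstep simulation of A's loop against the bridge loop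
theorem pv_sim (fa : Nat) (s : List Char) (fb i : Nat) (accA outB : List String) (flag : Bool)
    (hT : 't' ∉ s) (hU : '_' ∉ s) (ha : s.length - i < fa) (hb : s.length - i < fb)
    (hout : outB = accA.filter (· ≠ "t"))
    (hflag : flag = true ↔ (accA ≠ [] ∧ (accA.getLastD "" = "~" ∨ accA.getLastD "" = "t" ∨ accA.getLastD "" = "_")))
    (hfp : flag = true → 0 < i ∧ (s.getD (i - 1) ' ' = '-' ∨ s.getD (i - 1) ' ' = '~'))
    (hch : List.IsChain pvR accA) :
    (pvALoop s fa i accA).map (fun a => pvRemLoop a (a.length + 1) 0) = pvJLoop s fb i outB flag := by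
  induction fa generalizing fb i accA outB flag with
  | zero => omega
  | succ fa ih =>
    obtain ⟨fbp, rfl⟩ : ∃ fbp, fb = fbp + 1 := ⟨fb - 1, by omega⟩
    simp only [pvALoop, pvJLoop]
    by_cases hlen : i < s.length
    case neg =>
      rw [if_neg hlen, if_neg hlen]
      simp [hout, pvRemLoop_eq_filter accA hch]
    case pos =>
    rw [if_pos hlen, if_pos hlen]
    have hct : s.getD i ' ' ≠ 't' := fun hcx => hT (hcx ▸ pv_getD_mem s i hlen ' ')
    have hcu : s.getD i ' ' ≠ '_' := fun hcx => hU (hcx ▸ pv_getD_mem s i hlen ' ')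
    by_cases hsign : s.getD i ' ' = '~' ∨ s.getD i ' ' = '-'
    · by_cases hbin : 0 < i ∧ (PySem.Chars.isdigit (s.getD (i - 1) ' ') = true ∨
          s.getD (i - 1) ' ' = ')' ∨ s.getD (i - 1) ' ' ∈ ['!', '#'])
      · -- the previous char makes a binary context
        have hi0 : ¬ i = 0 := by omega
        have hBbin : pvOperandEnd (if i = 0 then ' ' else s.getD (i - 1) ' ') = true := by
          rw [if_neg hi0]
          exact (pvOperandEnd_iff _).mpr hbin.2
        rcases hsign with htil | hmin
        · -- '~' as binary operator: both raise
          rw [if_pos ⟨htil, hbin⟩, if_pos (Or.inl htil), if_pos hBbin, if_pos htil]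
          rfl
        · -- binary '-': appended verbatim on both sides
          have hnt : s.getD i ' ' ≠ '~' := by rw [hmin]; decide
          rw [if_neg (fun hx => hnt hx.1), if_pos ⟨hmin, hbin⟩, if_pos (Or.inr hmin),
            if_pos hBbin, if_neg hnt]
          apply ih
          · omega
          · omega
          · simp [hout, List.filter_append]
          · simp
          · simp
          · refine List.isChain_append.mpr ⟨hch, List.IsChain.singleton _, ?_⟩
            intro a _ b hb2
            simp only [List.head?_cons, Option.mem_def, Option.some.injEq] at hb2
            intro _
            rw [← hb2]
            decide
      · -- not a binary context
        have hBbin : ¬ pvOperandEnd (if i = 0 then ' ' else s.getD (i - 1) ' ') = true := by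
          by_cases hi : i = 0
          · rw [if_pos hi]; decide
          · rw [if_neg hi]
            intro hx
            exact hbin ⟨by omega, (pvOperandEnd_iff _).mp hx⟩
        have hA1 : ¬ (s.getD i ' ' = '~' ∧ 0 < i ∧ (PySem.Chars.isdigit (s.getD (i - 1) ' ') = true ∨
            s.getD (i - 1) ' ' = ')' ∨ s.getD (i - 1) ' ' ∈ ['!', '#'])) :=
          fun hx => hbin ⟨hx.2.1, hx.2.2⟩
        have hA2 : ¬ (s.getD i ' ' = '-' ∧ 0 < i ∧ (PySem.Chars.isdigit (s.getD (i - 1) ' ') = true ∨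
            s.getD (i - 1) ' ' = ')' ∨ s.getD (i - 1) ' ' ∈ ['!', '#'])) :=
          fun hx => hbin ⟨hx.2.1, hx.2.2⟩
        rw [if_neg hA1, if_neg hA2]
        by_cases hfl : flag = true
        · -- a sign right after a sign marker: both raise
          obtain ⟨hip, hprev⟩ := hfp hfl
          obtain ⟨hne', hmark⟩ := hflag.mp hfl
          have hA3 : ¬ (s.getD i ' ' = '-' ∧ (i = 0 ∨ s.getD (i - 1) ' ' = '(')) := by
            rintro ⟨-, h0 | hpa⟩
            · omega
            · rcases hprev with h | h <;> rw [hpa] at h <;> exact absurd h (by decide)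
          have hguard : ¬ (accA.isEmpty = true ∨ (accA.getLastD "" ≠ "~" ∧ accA.getLastD "" ≠ "t" ∧ accA.getLastD "" ≠ "_")) := by
            rintro (h | h)
            · exact hne' (List.isEmpty_iff.mp h)
            · rcases hmark with hm | hm | hm
              · exact h.1 hm
              · exact h.2.1 hm
              · exact h.2.2 hm
          rw [if_neg hA3, if_pos hsign, if_neg hguard, if_pos hsign, if_neg hBbin, if_pos hfl]
          rfl
        · -- a fresh sign run: A emits '_'/'~'/'t', the bridge emits '_'/'~'/nothing
          have hqge : i + 1 ≤ pvScanB s s.length (i + 1) := pvScanB_ge s s.length (i + 1)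
          have hrun : pvRunA s s.length (i + 1) 1 =
              (pvScanB s s.length (i + 1) - i, pvScanB s s.length (i + 1)) := by
            rw [pvRunA_eq]
            have : 1 + (pvScanB s s.length (i + 1) - (i + 1)) = pvScanB s s.length (i + 1) - i := by
              omega
            rw [this]
          have hguard : accA.isEmpty = true ∨ (accA.getLastD "" ≠ "~" ∧ accA.getLastD "" ≠ "t" ∧ accA.getLastD "" ≠ "_") := by
            by_cases he : accA = []
            · exact Or.inl (by simp [he])
            · right
              have hni := fun hm => hfl (hflag.mpr ⟨he, hm⟩)
              exact ⟨fun h => hni (Or.inl h), fun h => hni (Or.inr (Or.inl h)),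
                fun h => hni (Or.inr (Or.inr h))⟩
          have hlastnt : ∀ a ∈ accA.getLast?, a ≠ "t" := by
            intro a ha2
            rcases hguard with h | h
            · rw [List.isEmpty_iff.mp h] at ha2; simp at ha2
            · rw [List.getLastD_eq_getLast?, ha2] at h
              exact h.2.1
          have main : ∀ m : String, m = "_" ∨ m = "~" →
              (pvALoop s fa (pvScanB s s.length (i + 1))
                (accA ++ [if (pvScanB s s.length (i + 1) - i) % 2 = 1 then m else "t"])).map
                  (fun a => pvRemLoop a (a.length + 1) 0) =
              pvJLoop s fbp (pvScanB s s.length (i + 1))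
                (if (pvScanB s s.length (i + 1) - i) % 2 = 1 then outB ++ [m] else outB) true := by
            intro m hm
            have hmnt : m ≠ "t" := by rcases hm with h | h <;> rw [h] <;> decide
            apply ih
            · omega
            · omega
            · by_cases hpar : (pvScanB s s.length (i + 1) - i) % 2 = 1
              · rw [if_pos hpar, if_pos hpar]
                simp [hout, List.filter_append, hmnt]
              · rw [if_neg hpar, if_neg hpar]
                simp [hout, List.filter_append]
            · constructor
              · intro _
                refine ⟨by simp, ?_⟩
                rw [List.getLastD_concat]
                by_cases hpar : (pvScanB s s.length (i + 1) - i) % 2 = 1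
                · rw [if_pos hpar]
                  rcases hm with h | h <;> rw [h] <;> simp
                · rw [if_neg hpar]
                  simp
              · intro _; rfl
            · intro _
              refine ⟨by omega, ?_⟩
              by_cases hq : pvScanB s s.length (i + 1) = i + 1
              · rw [hq]
                simpa using hsign.symm
              · exact Or.inl (pvScanB_prev s s.length (i + 1) hq)
            · refine List.isChain_append.mpr ⟨hch, List.IsChain.singleton _, ?_⟩
              intro a ha2 b hb2
              simp only [List.head?_cons, Option.mem_def, Option.some.injEq] at hb2
              intro hat
              rw [← hb2]
              exact absurd hat (hlastnt a ha2)
          by_cases hA3 : s.getD i ' ' = '-' ∧ (i = 0 ∨ s.getD (i - 1) ' ' = '(')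
          · have hBm : s.getD i ' ' = '-' ∧ (i = 0 ∨ (if i = 0 then ' ' else s.getD (i - 1) ' ') = '(') := by
              refine ⟨hA3.1, ?_⟩
              rcases hA3.2 with h0 | hpa
              · exact Or.inl h0
              · by_cases hi : i = 0
                · exact Or.inl hi
                · rw [if_neg hi]; exact Or.inr hpa
            rw [if_pos hA3, hrun, if_pos hsign, if_neg hBbin, if_neg hfl, if_pos hBm]
            exact main "_" (Or.inl rfl)
          · have hBm : ¬ (s.getD i ' ' = '-' ∧ (i = 0 ∨ (if i = 0 then ' ' else s.getD (i - 1) ' ') = '(')) := by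
              rintro ⟨h1, h0 | hpa⟩
              · exact hA3 ⟨h1, Or.inl h0⟩
              · by_cases hi : i = 0
                · exact hA3 ⟨h1, Or.inl hi⟩
                · rw [if_neg hi] at hpa
                  exact hA3 ⟨h1, Or.inr hpa⟩
            rw [if_neg hA3, if_pos hsign, if_pos hguard, hrun, if_pos hsign, if_neg hBbin,
              if_neg hfl, if_neg hBm]
            exact main "~" (Or.inr rfl)
    · -- an ordinary character, copied by both
      push Not at hsign
      have hA1 : ¬ (s.getD i ' ' = '~' ∧ 0 < i ∧ (PySem.Chars.isdigit (s.getD (i - 1) ' ') = true ∨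
          s.getD (i - 1) ' ' = ')' ∨ s.getD (i - 1) ' ' ∈ ['!', '#'])) := fun hx => hsign.1 hx.1
      have hA2 : ¬ (s.getD i ' ' = '-' ∧ 0 < i ∧ (PySem.Chars.isdigit (s.getD (i - 1) ' ') = true ∨
          s.getD (i - 1) ' ' = ')' ∨ s.getD (i - 1) ' ' ∈ ['!', '#'])) := fun hx => hsign.2 hx.1
      have hA3 : ¬ (s.getD i ' ' = '-' ∧ (i = 0 ∨ s.getD (i - 1) ' ' = '(')) := fun hx => hsign.2 hx.1
      have hA4 : ¬ (s.getD i ' ' = '~' ∨ s.getD i ' ' = '-') := by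
        rintro (h | h)
        · exact hsign.1 h
        · exact hsign.2 h
      rw [if_neg hA1, if_neg hA2, if_neg hA3, if_neg hA4, if_neg hA4]
      have hne2 : ∀ (d : Char) (t : String), s.getD i ' ' ≠ d → t.toList = [d] →
          String.ofList [s.getD i ' '] ≠ t := by
        intro d t hd ht hx
        have h2 := congrArg String.toList hx
        rw [ht] at h2
        simp at h2
        exact hd h2
      have hxt : String.ofList [s.getD i ' '] ≠ "t" := hne2 't' "t" hct rfl
      have hxtil : String.ofList [s.getD i ' '] ≠ "~" := hne2 '~' "~" hsign.1 rfl
      have hxund : String.ofList [s.getD i ' '] ≠ "_" := hne2 '_' "_" hcu rfl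
      apply ih
      · omega
      · omega
      · rw [hout, List.filter_append, List.filter_singleton]
        rw [show decide (String.ofList [s.getD i ' '] ≠ "t") = true by simpa using hxt]
        rfl
      · simp only [List.getLastD_concat, Bool.false_eq_true, false_iff]
        rintro ⟨-, h | h | h⟩
        · exact hxtil h
        · exact hxt h
        · exact hxund h
      · simp
      · refine List.isChain_append.mpr ⟨hch, List.IsChain.singleton _, ?_⟩
        intro a _ b hb2
        simp only [List.head?_cons, Option.mem_def, Option.some.injEq] at hb2
        intro _
        rw [← hb2]
        exact hxt

-- ---- facts about pvScanB needed for the bridge ↔ port-B simulation ----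

theorem pvScanB_le (s : List Char) (fuel j : Nat) (h : j ≤ s.length) :
    pvScanB s fuel j ≤ s.length := by
  induction fuel generalizing j with
  | zero => exact h
  | succ fuel ih =>
    simp only [pvScanB]
    by_cases hc : j < s.length ∧ s.getD j ' ' = '-'
    · rw [if_pos hc]; exact ih (j + 1) (by omega)
    · rw [if_neg hc]; exact h

theorem pvScanB_stop (s : List Char) (fuel j : Nat) (h : s.length - j ≤ fuel)
    (hlt : pvScanB s fuel j < s.length) : s.getD (pvScanB s fuel j) ' ' ≠ '-' := by
  induction fuel generalizing j with
  | zero =>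
    simp only [pvScanB] at hlt ⊢
    omega
  | succ fuel ih =>
    simp only [pvScanB] at hlt ⊢
    by_cases hc : j < s.length ∧ s.getD j ' ' = '-'
    · rw [if_pos hc] at hlt ⊢
      exact ih (j + 1) (by omega) hlt
    · rw [if_neg hc] at hlt ⊢
      intro hx
      exact hc ⟨hlt, hx⟩

theorem pvScanB_mem (s : List Char) (fuel : Nat) :
    ∀ j t, j ≤ t → t < pvScanB s fuel j → s.getD t ' ' = '-' := by
  induction fuel with
  | zero =>
    intro j t h1 h2
    simp only [pvScanB] at h2
    omega
  | succ fuel ih =>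
    intro j t h1 h2
    simp only [pvScanB] at h2
    by_cases hc : j < s.length ∧ s.getD j ' ' = '-'
    · rw [if_pos hc] at h2
      by_cases ht : t = j
      · rw [ht]; exact hc.2
      · exact ih (j + 1) t (by omega) h2
    · rw [if_neg hc] at h2
      omega

-- ---- B's emission loop: stepping through a '-' run just increments the pending count ----

theorem pvC_run (s : List Char) :
    ∀ (k j c f : Nat) (out : List String) (m : String),
      s.length - j < f → j + k ≤ s.length → 0 < j →
      (s.getD (j - 1) ' ' = '-' ∨ s.getD (j - 1) ' ' = '~') →
      (∀ t, j ≤ t → t < j + k → s.getD t ' ' = '-') →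
      pvCLoop s f j out (some (m, c)) = pvCLoop s (f - k) (j + k) out (some (m, c + k)) := by
  intro k
  induction k with
  | zero => intro j c f out m _ _ _ _ _; simp
  | succ k ih =>
    intro j c f out m hf hjk hj hprev hall
    obtain ⟨f1, rfl⟩ : ∃ f1, f = f1 + 1 := ⟨f - 1, by omega⟩
    have hjn : j < s.length := by omega
    have hjm : s.getD j ' ' = '-' := hall j (le_refl j) (by omega)
    have hguard : s.getD j ' ' = '~' ∨
        (s.getD j ' ' = '-' ∧ ¬ (0 < j ∧ pvOperandEnd (s.getD (j - 1) ' ') = true)) := by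
      refine Or.inr ⟨hjm, ?_⟩
      rintro ⟨-, hop⟩
      rcases hprev with h | h <;> rw [h] at hop <;> exact absurd hop (by decide)
    simp only [pvCLoop, if_pos hjn, if_pos hguard]
    have := ih (j + 1) (c + 1) f1 out m (by omega) (by omega) (by omega)
      (Or.inl (by simpa using hjm)) (fun t h1 h2 => hall t (by omega) (by omega))
    rw [this]
    have e1 : f1 + 1 - (k + 1) = f1 - k := by omega
    have e2 : j + 1 + k = j + (k + 1) := by omega
    have e3 : c + 1 + k = c + (k + 1) := by omega
    rw [e1, e2, e3]

-- unpacking Pre_'s per-'~' condition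
theorem pvTildeOk_tilde (s : List Char) (q : Nat) (h : pvTildeOk s q = true)
    (hq : s.getD q ' ' = '~') (h0 : 0 < q) :
    pvOperandEnd (s.getD (q - 1) ' ') = false ∧ s.getD (q - 1) ' ' ≠ '~' ∧
      (s.getD (q - 1) ' ' = '-' → 2 ≤ q ∧ pvOperandEnd (s.getD (q - 2) ' ') = true) := by
  have h0' : ¬ q = 0 := by omega
  simp [pvTildeOk, h0'] at h
  simp [pvOperandEnd]
  tauto

-- Pre_ implies Source B's validation pass raises nothing
theorem pvValid_of (s : List Char) (h : ∀ i, i < s.length → pvTildeOk s i = true) :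
    pvValid s = true := by
  unfold pvValid
  rw [List.all_eq_true]
  intro i hi
  rw [List.mem_range] at hi
  have hok := h i hi
  by_cases h0 : i = 0
  · simp [h0]
  · have h0' : 0 < i := by omega
    simp [pvTildeOk, h0] at hok
    simp [pvOperandEnd, h0']
    tauto

-- the bridge loop agrees with B's emission loop on validated input
theorem pvJC (s : List Char)
    (hval : ∀ i, i < s.length → pvTildeOk s i = true)
    (hlast1 : s.getD (s.length - 1) ' ' ≠ '-') (hlast2 : s.getD (s.length - 1) ' ' ≠ '~') :
    ∀ (d i : Nat) (out : List String) (f f' : Nat),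
      s.length - i ≤ d → s.length - i < f → s.length - i < f' →
      pvJLoop s f i out false = some (pvCLoop s f' i out none) := by
  intro d
  induction d with
  | zero =>
    intro i out f f' hd hf hf'
    obtain ⟨fa, rfl⟩ : ∃ fa, f = fa + 1 := ⟨f - 1, by omega⟩
    obtain ⟨fc, rfl⟩ : ∃ fc, f' = fc + 1 := ⟨f' - 1, by omega⟩
    have hni : ¬ i < s.length := by omega
    simp only [pvJLoop, pvCLoop, if_neg hni]
  | succ d ih =>
    intro i out f f' hd hf hf'
    obtain ⟨fa, rfl⟩ : ∃ fa, f = fa + 1 := ⟨f - 1, by omega⟩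
    obtain ⟨fc, rfl⟩ : ∃ fc, f' = fc + 1 := ⟨f' - 1, by omega⟩
    by_cases hni : i < s.length
    case neg => simp only [pvJLoop, pvCLoop, if_neg hni]
    case pos =>
    simp only [pvJLoop, pvCLoop, if_pos hni]
    by_cases hsign : s.getD i ' ' = '~' ∨ s.getD i ' ' = '-'
    · by_cases hbin : 0 < i ∧ pvOperandEnd (s.getD (i - 1) ' ') = true
      · -- binary context: A-bridge raises on '~' (excluded by validity) or copies '-'
        have hi0 : ¬ i = 0 := by omega
        have hpv : pvOperandEnd (if i = 0 then ' ' else s.getD (i - 1) ' ') = true := by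
          rw [if_neg hi0]; exact hbin.2
        rcases hsign with htil | hmin
        · exfalso
          have := pvTildeOk_tilde s i (hval i hni) htil hbin.1
          rw [this.1] at hbin
          exact absurd hbin.2 (by decide)
        · have hneq : s.getD i ' ' ≠ '~' := by rw [hmin]; decide
          rw [if_pos (Or.inr hmin), if_pos hpv, if_neg hneq]
          have hgC : ¬ (s.getD i ' ' = '~' ∨
              (s.getD i ' ' = '-' ∧ ¬ (0 < i ∧ pvOperandEnd (s.getD (i - 1) ' ') = true))) := by
            rintro (h | ⟨-, hn⟩)
            · exact hneq h
            · exact hn hbin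
          rw [if_neg hgC]
          have hch : String.ofList [s.getD i ' '] = "-" := by rw [hmin]
          rw [hch]
          exact ih (i + 1) (out ++ ["-"]) fa fc (by omega) (by omega) (by omega)
      · -- unary sign: the bridge jumps the run; B counts through it
        have hBbin : ¬ pvOperandEnd (if i = 0 then ' ' else s.getD (i - 1) ' ') = true := by
          by_cases hi : i = 0
          · rw [if_pos hi]; decide
          · rw [if_neg hi]
            intro hx
            exact hbin ⟨by omega, hx⟩
        rw [if_pos hsign, if_neg hBbin, if_neg (by decide : ¬ (false = true))]
        have hgC : s.getD i ' ' = '~' ∨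
            (s.getD i ' ' = '-' ∧ ¬ (0 < i ∧ pvOperandEnd (s.getD (i - 1) ' ') = true)) := by
          rcases hsign with h | h
          · exact Or.inl h
          · exact Or.inr ⟨h, hbin⟩
        rw [if_pos hgC]
        -- notation
        have hq1 : i + 1 ≤ pvScanB s s.length (i + 1) := pvScanB_ge s s.length (i + 1)
        have hq2 : pvScanB s s.length (i + 1) ≤ s.length :=
          pvScanB_le s s.length (i + 1) (by omega)
        have hq4 : ∀ t, i + 1 ≤ t → t < pvScanB s s.length (i + 1) → s.getD t ' ' = '-' :=
          fun t h1 h2 => pvScanB_mem s s.length (i + 1) t h1 h2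
        set q := pvScanB s s.length (i + 1) with hqdef
        have hqn : q < s.length := by
          rcases lt_or_eq_of_le hq2 with h | h
          · exact h
          · exfalso
            by_cases hq : q = i + 1
            · have : i = s.length - 1 := by omega
              rcases hsign with hx | hx
              · exact hlast2 (this ▸ hx)
              · exact hlast1 (this ▸ hx)
            · have : s.getD (q - 1) ' ' = '-' := hq4 (q - 1) (by omega) (by omega)
              rw [h] at this
              exact hlast1 this
        have hqd : s.getD q ' ' ≠ '-' := pvScanB_stop s s.length (i + 1) (by omega) hqn
        have hqt : s.getD q ' ' ≠ '~' := by
          intro hqt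
          have h0q : 0 < q := by omega
          obtain ⟨hA, hB, hC⟩ := pvTildeOk_tilde s q (hval q hqn) hqt h0q
          by_cases hq : q = i + 1
          · have hqi : q - 1 = i := by omega
            rcases hsign with hx | hx
            · exact hB (hqi ▸ hx)
            · have := hC (hqi ▸ hx)
              have hii : q - 2 = i - 1 := by omega
              exact hbin ⟨by omega, hii ▸ this.2⟩
          · have hpm : s.getD (q - 1) ' ' = '-' := hq4 (q - 1) (by omega) (by omega)
            obtain ⟨h2q, hop⟩ := hC hpm
            by_cases hq2' : i + 1 ≤ q - 2
            · have : s.getD (q - 2) ' ' = '-' := hq4 (q - 2) hq2' (by omega)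
              rw [this] at hop
              exact absurd hop (by decide)
            · have hqi : q - 2 = i := by omega
              rw [hqi] at hop
              rcases hsign with hx | hx <;> rw [hx] at hop <;> exact absurd hop (by decide)
        -- markers coincide
        have hm : (if s.getD i ' ' = '-' ∧ (i = 0 ∨ (if i = 0 then ' ' else s.getD (i - 1) ' ') = '(')
                   then "_" else "~") =
                  (if s.getD i ' ' = '-' ∧ (i = 0 ∨ s.getD (i - 1) ' ' = '(') then "_" else "~") := by
          by_cases hi : i = 0
          · simp [hi]
          · rw [if_neg hi]
        rw [hm]
        set mC := (if s.getD i ' ' = '-' ∧ (i = 0 ∨ s.getD (i - 1) ' ' = '(') then "_" else "~")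
          with hmC
        -- run through the '-'s on B's side
        have hrun := pvC_run s (q - (i + 1)) (i + 1) 1 fc out mC (by omega) (by omega) (by omega)
          (by rcases hsign with h | h
              · exact Or.inr (by simpa using h)
              · exact Or.inl (by simpa using h))
          (fun t h1 h2 => hq4 t h1 (by omega))
        have e1 : i + 1 + (q - (i + 1)) = q := by omega
        have e2 : 1 + (q - (i + 1)) = q - i := by omega
        rw [e1, e2] at hrun
        rw [hrun]
        -- unfold B at q (flush + copy)
        obtain ⟨fq, hfq⟩ : ∃ fq, fc - (q - (i + 1)) = fq + 1 := ⟨fc - (q - (i + 1)) - 1, by omega⟩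
        rw [hfq]
        have hgq : ¬ (s.getD q ' ' = '~' ∨
            (s.getD q ' ' = '-' ∧ ¬ (0 < q ∧ pvOperandEnd (s.getD (q - 1) ' ') = true))) := by
          rintro (h | ⟨h, -⟩)
          · exact hqt h
          · exact hqd h
        simp only [pvCLoop, if_pos hqn, if_neg hgq]
        -- unfold the bridge at q (copy)
        obtain ⟨fa2, hfa2⟩ : ∃ fa2, fa = fa2 + 1 := ⟨fa - 1, by omega⟩
        rw [hfa2]
        have hsq : ¬ (s.getD q ' ' = '~' ∨ s.getD q ' ' = '-') := by
          rintro (h | h)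
          · exact hqt h
          · exact hqd h
        simp only [pvJLoop, if_pos hqn, if_neg hsq]
        exact ih (q + 1) _ fa2 fq (by omega) (by omega) (by omega)
    · -- ordinary character, copied by both
      have hgC : ¬ (s.getD i ' ' = '~' ∨
          (s.getD i ' ' = '-' ∧ ¬ (0 < i ∧ pvOperandEnd (s.getD (i - 1) ' ') = true))) := by
        rintro (h | ⟨h, -⟩) <;> exact hsign (by tauto)
      rw [if_neg hsign, if_neg hgC]
      exact ih (i + 1) _ fa fc (by omega) (by omega) (by omega)

theorem pvGetLastD_eq_getD (l : List Char) (d : Char) (_h : l ≠ []) :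
    l.getLastD d = l.getD (l.length - 1) d := by
  rw [List.getLastD_eq_getLast?, List.getLast?_eq_getElem?, List.getD_eq_getElem?_getD]

-- ===== VERDICT (by name: the statement is the Claim_ definition above) =====
theorem check_tilda_and_neg_spec : Claim_equal_check_tilda_and_neg := by
  intro s _hDom hPre
  unfold Spec_check_tilda_and_neg
  obtain ⟨hne, hl1, hl2, hT, hU, hval⟩ := hPre
  unfold check_tilda_and_neg check_tilda_and_neg_alt
  obtain ⟨lc, hlc⟩ : ∃ lc, s.toList.getLast? = some lc :=
    Option.ne_none_iff_exists'.mp (by simpa [List.getLast?_eq_none_iff] using hne)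
  have hlcd : s.toList.getLastD ' ' = lc := by rw [List.getLastD_eq_getLast?, hlc]; rfl
  rw [hlcd] at hl1 hl2
  have hcondB : ¬ (s.toList = [] ∨ s.toList.getLastD ' ' = '-' ∨ s.toList.getLastD ' ' = '~') := by
    rw [hlcd]
    rintro (h | h | h)
    · exact hne h
    · exact hl2 h
    · exact hl1 h
  rw [hlc, if_neg hcondB]
  have hlc2 : ¬ (lc = '~' ∨ lc = '-') := by
    rintro (h | h)
    · exact hl1 h
    · exact hl2 h
  show (if lc = '~' ∨ lc = '-' then ([] : List String)
        else if PySem.Chars.isIn ['t'] s.toList = true ∨ PySem.Chars.isIn ['_'] s.toList = true then []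
        else match pvALoop s.toList (s.toList.length + 1) 0 [] with
             | none => []
             | some acc => pvRemLoop acc (acc.length + 1) 0) = _
  rw [if_neg hlc2]
  have htIn : ¬ (PySem.Chars.isIn ['t'] s.toList = true ∨ PySem.Chars.isIn ['_'] s.toList = true) := by
    rintro (h | h)
    · exact hT ((List.singleton_infix_iff _ _).mp ((PySem.Chars.isIn_iff_infix _ _).mp h))
    · exact hU ((List.singleton_infix_iff _ _).mp ((PySem.Chars.isIn_iff_infix _ _).mp h))
  rw [if_neg htIn, if_neg htIn]
  have hvalid : ¬ pvValid s.toList = false := by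
    rw [pvValid_of s.toList hval]
    decide
  rw [if_neg hvalid]
  have hgetd : s.toList.getD (s.toList.length - 1) ' ' = lc := by
    rw [← pvGetLastD_eq_getD s.toList ' ' hne, hlcd]
  have hsim := pv_sim (s.toList.length + 1) s.toList (s.toList.length + 1) 0 [] [] false hT hU
    (by omega) (by omega) (by simp) (by simp) (by simp) (List.IsChain.nil)
  have hJC := pvJC s.toList hval (by rw [hgetd]; exact hl2) (by rw [hgetd]; exact hl1)
    s.toList.length 0 [] (s.toList.length + 1) (s.toList.length + 1)
    (by omega) (by omega) (by omega)
  rw [hJC] at hsim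
  cases ha : pvALoop s.toList (s.toList.length + 1) 0 [] with
  | none => rw [ha] at hsim; simp at hsim
  | some acc =>
    rw [ha] at hsim
    simp only [Option.map_some, Option.some.injEq] at hsim
    exact hsim
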